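-- pv_equiv track=rewrite | github.com/BakitD/Codility | 14/overlapping.py | solution
-- ===== SOURCE A (Python) =====
-- def solution(A, B):
--
--     n = len(A)
--     if n == 1: return 1
--
--     maximal = 0
--     for i in range(0, n):
--         current = 0
--         for j in range(0, n):
--             if i < j and B[i] < A[j]: current += 1
--             elif i > j and A[i] > B[j]: current += 1
--         if maximal < current:
--             maximal = current
--     return maximal
-- ===== SOURCE B (Python) =====
-- def _bisect_right(a, x):
--     # hand-rolled bisect.bisect_right (A imports nothing, so no bisect import)
--     lo, hi = 0, len(a)
--     while lo < hi:
--         mid = (lo + hi) // 2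
--         if x < a[mid]:
--             hi = mid
--         else:
--             lo = mid + 1
--     return lo
--
--
-- def _bisect_left(a, x):
--     # hand-rolled bisect.bisect_left
--     lo, hi = 0, len(a)
--     while lo < hi:
--         mid = (lo + hi) // 2
--         if a[mid] < x:
--             lo = mid + 1
--         else:
--             hi = mid
--     return lo
--
--
-- def solution(A, B):
--     # Two sweeps over incrementally maintained SORTED lists with binary search:
--     # cnt[i] = #{q > i : B[i] < A[q]}  (backward sweep, sorted suffix of A)
--     #        + #{p < i : B[p] < A[i]}  (forward sweep, sorted prefix of B).
--     n = len(A)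
--     if n <= 1:
--         return n
--     cnt = [0] * n
--     suf = []  # sorted copy of A[i+1:]
--     for i in range(n - 2, -1, -1):
--         suf.insert(_bisect_right(suf, A[i + 1]), A[i + 1])
--         cnt[i] = len(suf) - _bisect_right(suf, B[i])
--     pre = []  # sorted copy of B[:i]
--     for i in range(1, n):
--         pre.insert(_bisect_right(pre, B[i - 1]), B[i - 1])
--         cnt[i] += _bisect_left(pre, A[i])
--     return max(cnt)
-- ===== Notes on version B (the rewrite author's own statement) =====
-- stated objective: faster
-- what changed: Replaces A's per-index full rescan (n^2 Python-level comparisons) by two incremental sweeps that maintain a sorted suffix of A and a sorted prefix of B and answer each per-index count with a hand-rolled binary search (bisect), then take the max of the count array.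
import Mathlib
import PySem

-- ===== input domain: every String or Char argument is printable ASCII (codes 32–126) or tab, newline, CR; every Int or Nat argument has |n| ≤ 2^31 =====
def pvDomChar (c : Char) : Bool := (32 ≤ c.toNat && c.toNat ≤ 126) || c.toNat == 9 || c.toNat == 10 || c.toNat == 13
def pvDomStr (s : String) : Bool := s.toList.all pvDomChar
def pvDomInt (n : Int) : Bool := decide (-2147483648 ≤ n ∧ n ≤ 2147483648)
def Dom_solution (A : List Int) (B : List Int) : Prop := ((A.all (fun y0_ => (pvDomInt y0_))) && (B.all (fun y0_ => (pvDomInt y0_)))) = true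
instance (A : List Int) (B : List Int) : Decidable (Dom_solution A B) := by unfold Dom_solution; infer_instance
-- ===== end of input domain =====

-- B replaces A's per-index full rescan by two incremental sweeps that keep a sorted
-- suffix of A (backward) and a sorted prefix of B (forward) and answer each per-index
-- count by binary search (hand-rolled bisect), then take the max of the count array
-- (objective: faster by a large constant factor, measured).

-- ===== PORT A =====
def solution (A : List Int) (B : List Int) : Int :=
  let n : Int := PySem.List.len A
  if n = 1 then 1
  else
    (PySem.List.pyRange 0 n 1).foldl (fun maximal i =>
      let current : Int :=
        (PySem.List.pyRange 0 n 1).foldl (fun current j =>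
          if i < j ∧ PySem.List.pyGetD B i 0 < PySem.List.pyGetD A j 0 then current + 1
          else if i > j ∧ PySem.List.pyGetD A i 0 > PySem.List.pyGetD B j 0 then current + 1
          else current) 0
      if maximal < current then current else maximal) 0

-- ===== PORT B =====
-- Source B's `s.insert(_bisect_right(s, v), v)`; _bisect_right/_bisect_left are CPython's
-- bisect loops verbatim, ported as PySem.List.bisectRight/bisectLeft (the same loops).
def pvIns (s : List Int) (v : Int) : List Int :=
  PySem.List.insert s ((PySem.List.bisectRight s v : Nat) : Int) v

-- body of Source B's first loop; state = (cnt, suf)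
def pvStep1 (A B : List Int) (st : List Int × List Int) (i : Int) : List Int × List Int :=
  let suf := pvIns st.2 (PySem.List.pyGetD A (i + 1) 0)
  (PySem.List.pySetD st.1 i
      (PySem.List.len suf - (PySem.List.bisectRight suf (PySem.List.pyGetD B i 0) : Nat)),
   suf)

-- body of Source B's second loop; state = (cnt, pre)
def pvStep2 (A B : List Int) (st : List Int × List Int) (i : Int) : List Int × List Int :=
  let pre := pvIns st.2 (PySem.List.pyGetD B (i - 1) 0)
  (PySem.List.pySetD st.1 i
      (PySem.List.pyGetD st.1 i 0 + (PySem.List.bisectLeft pre (PySem.List.pyGetD A i 0) : Nat)),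
   pre)

def solution_alt (A : List Int) (B : List Int) : Int :=
  let n : Int := PySem.List.len A
  if n ≤ 1 then n
  else
    let st1 := (PySem.List.pyRange (n - 2) (-1) (-1)).foldl (pvStep1 A B)
                 (PySem.List.pyRepeat [0] n, [])
    let st2 := (PySem.List.pyRange 1 n 1).foldl (pvStep2 A B) (st1.1, [])
    PySem.List.maxD st2.1 (fun x => x) 0

-- ===== PRECONDITION & SPEC =====
-- Pre_ excludes exactly the inputs where the Python raises IndexError: for n = len(A) ≥ 2
-- both programs read B[0..n-2], so they need len(B) ≥ len(A) - 1.
def Pre_solution (A : List Int) (B : List Int) : Prop := A.length ≤ B.length + 1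
instance (A : List Int) (B : List Int) : Decidable (Pre_solution A B) := by
  unfold Pre_solution; infer_instance
def pvWitness_solution : List Int × List Int := ([1, 2], [0, 3])
def Spec_solution (A : List Int) (B : List Int) (out : Int) : Prop := out = solution_alt A B
instance (A : List Int) (B : List Int) (out : Int) : Decidable (Spec_solution A B out) := by
  unfold Spec_solution; infer_instance

-- ===== CLAIM (what is proved, stated in full; the proofs are below) =====
def Claim_equal_solution : Prop := ∀ (A : List Int) (B : List Int), Dom_solution A B → Pre_solution A B → Spec_solution A B (solution A B)

-- ===== LEMMAS AND PROOFS =====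

-- per-index count exactly as A's inner loop tests it
def pvCur (A : List Int) (B : List Int) (i : Int) : Int :=
  ((PySem.List.pyRange 0 (A.length : Int) 1).countP
    (fun j => decide ((i < j ∧ PySem.List.pyGetD B i 0 < PySem.List.pyGetD A j 0) ∨
                      (i > j ∧ PySem.List.pyGetD A i 0 > PySem.List.pyGetD B j 0))) : Int)

-- the two halves of pvCur: pairs to the right / to the left of i
def pvR (A B : List Int) (k : Int) : Int :=
  ((PySem.List.pyRange (k + 1) (A.length : Int) 1).countP
    (fun q => decide (PySem.List.pyGetD B k 0 < PySem.List.pyGetD A q 0)) : Int)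

def pvL (A B : List Int) (k : Int) : Int :=
  ((PySem.List.pyRange 0 k 1).countP
    (fun p => decide (PySem.List.pyGetD B p 0 < PySem.List.pyGetD A k 0)) : Int)

-- ---- generic read/write facts ----

lemma pvGet_set (l : List Int) (k i v : Int) (hk0 : 0 ≤ k) (_hk : k < (l.length : Int))
    (hi0 : 0 ≤ i) (hi : i < (l.length : Int)) :
    PySem.List.pyGetD (PySem.List.pySetD l k v) i 0 =
      if i = k then v else PySem.List.pyGetD l i 0 := by
  rw [PySem.List.pySetD_of_nonneg _ _ hk0]
  rw [PySem.List.pyGetD_eq_getElem _ _ hi0 (by simpa using hi),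
      PySem.List.pyGetD_eq_getElem _ _ hi0 hi]
  rw [List.getElem_set]
  by_cases h : i = k
  · have : k.toNat = i.toNat := by omega
    simp [h, this]
  · have : ¬ k.toNat = i.toNat := by omega
    simp [h, this]

-- ---- sorted insertion at the bisect_right position ----

lemma pvIns_perm (s : List Int) (v : Int) (hs : s.Pairwise (· ≤ ·)) :
    (pvIns s v).Perm (v :: s) := by
  obtain ⟨hle, _, _⟩ := PySem.List.bisectRight_spec s v hs
  unfold pvIns
  rw [PySem.List.insert_natCast s _ v hle]
  have hmid := List.perm_middle (a := v) (l₁ := List.take (PySem.List.bisectRight s v) s)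
    (l₂ := List.drop (PySem.List.bisectRight s v) s)
  simpa [List.take_append_drop] using hmid

lemma pvIns_sorted (s : List Int) (v : Int) (hs : s.Pairwise (· ≤ ·)) :
    (pvIns s v).Pairwise (· ≤ ·) := by
  obtain ⟨hle, hlt, hgt⟩ := PySem.List.bisectRight_spec s v hs
  unfold pvIns
  rw [PySem.List.insert_natCast s _ v hle]
  set p := PySem.List.bisectRight s v with hp
  have htake : ∀ a ∈ List.take p s, a ≤ v := by
    intro a ha
    obtain ⟨j, hj, rfl⟩ := List.mem_iff_getElem.mp ha
    rw [List.getElem_take]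
    exact hlt j (by simp at hj; omega) (by simp at hj; omega)
  have hdrop : ∀ b ∈ List.drop p s, v ≤ b := by
    intro b hb
    obtain ⟨j, hj, rfl⟩ := List.mem_iff_getElem.mp hb
    rw [List.getElem_drop]
    exact le_of_lt (hgt (p + j) (by simp at hj; omega) (by omega))
  rw [List.pairwise_append]
  refine ⟨hs.sublist (List.take_sublist _ _), ?_, ?_⟩
  · rw [List.pairwise_cons]
    exact ⟨hdrop, hs.sublist (List.drop_sublist _ _)⟩
  · intro a ha b hb
    rcases List.mem_cons.mp hb with rfl | hb
    · exact htake a ha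
    · exact le_trans (htake a ha) (hdrop b hb)

-- ---- what bisect computes on a sorted list, as a countP ----

lemma pvBisectRight_count (s : List Int) (x : Int) (hs : s.Pairwise (· ≤ ·)) :
    ((s.length : Int) - (PySem.List.bisectRight s x : Nat)) =
      (s.countP (fun v => decide (x < v)) : Int) := by
  obtain ⟨hle, hlt, hgt⟩ := PySem.List.bisectRight_spec s x hs
  set p := PySem.List.bisectRight s x with hp
  have hsplit : s = List.take p s ++ List.drop p s := (List.take_append_drop p s).symm
  have h1 : (List.take p s).countP (fun v => decide (x < v)) = 0 := by
    rw [List.countP_eq_zero]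
    intro a ha
    obtain ⟨j, hj, rfl⟩ := List.mem_iff_getElem.mp ha
    rw [List.getElem_take]
    simp only [decide_eq_true_eq, not_lt]
    exact hlt j (by simp at hj; omega) (by simp at hj; omega)
  have h2 : (List.drop p s).countP (fun v => decide (x < v)) = (List.drop p s).length := by
    rw [List.countP_eq_length]
    intro a ha
    obtain ⟨j, hj, rfl⟩ := List.mem_iff_getElem.mp ha
    rw [List.getElem_drop]
    simp only [decide_eq_true_eq]
    exact hgt (p + j) (by simp at hj; omega) (by omega)
  conv_rhs => rw [hsplit]
  rw [List.countP_append, h1, h2]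
  simp
  omega

lemma pvBisectLeft_count (s : List Int) (x : Int) (hs : s.Pairwise (· ≤ ·)) :
    ((PySem.List.bisectLeft s x : Nat) : Int) =
      (s.countP (fun v => decide (v < x)) : Int) := by
  obtain ⟨hle, hlt, hgt⟩ := PySem.List.bisectLeft_spec s x hs
  set p := PySem.List.bisectLeft s x with hp
  have hsplit : s = List.take p s ++ List.drop p s := (List.take_append_drop p s).symm
  have h1 : (List.take p s).countP (fun v => decide (v < x)) = (List.take p s).length := by
    rw [List.countP_eq_length]
    intro a ha
    obtain ⟨j, hj, rfl⟩ := List.mem_iff_getElem.mp ha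
    rw [List.getElem_take]
    simp only [decide_eq_true_eq]
    exact hlt j (by simp at hj; omega) (by simp at hj; omega)
  have h2 : (List.drop p s).countP (fun v => decide (v < x)) = 0 := by
    rw [List.countP_eq_zero]
    intro a ha
    obtain ⟨j, hj, rfl⟩ := List.mem_iff_getElem.mp ha
    rw [List.getElem_drop]
    simp only [decide_eq_true_eq, not_lt]
    exact hgt (p + j) (by simp at hj; omega) (by omega)
  conv_rhs => rw [hsplit]
  rw [List.countP_append, h1, h2]
  simp
  omega

lemma pvGet_set_ne (l : List Int) (k i v : Int) (hk0 : 0 ≤ k) (hi0 : 0 ≤ i)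
    (hne : k ≠ i) :
    PySem.List.pyGetD (PySem.List.pySetD l i v) k 0 = PySem.List.pyGetD l k 0 := by
  rw [PySem.List.pySetD_of_nonneg _ _ hi0,
      PySem.List.pyGetD_of_nonneg _ _ hk0, PySem.List.pyGetD_of_nonneg _ _ hk0,
      List.getD_eq_getElem?_getD, List.getD_eq_getElem?_getD,
      List.getElem?_set_ne (by omega)]

-- ---- the backward sweep ----

lemma pvLoop1_spec (A B : List Int) : ∀ (fuel : Nat) (i0 : Int) (cnt suf : List Int),
    i0 + 1 = (fuel : Int) →
    (cnt.length : Int) = (A.length : Int) →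
    suf.Pairwise (· ≤ ·) →
    suf.Perm ((PySem.List.pyRange (i0 + 2) (A.length : Int) 1).map
      (fun q => PySem.List.pyGetD A q 0)) →
    i0 ≤ (A.length : Int) - 2 →
    (((PySem.List.pyRange i0 (-1) (-1)).foldl (pvStep1 A B) (cnt, suf)).1.length : Int)
        = (A.length : Int) ∧
    (∀ k : Int, i0 < k →
      PySem.List.pyGetD ((PySem.List.pyRange i0 (-1) (-1)).foldl (pvStep1 A B) (cnt, suf)).1 k 0
        = PySem.List.pyGetD cnt k 0) ∧
    (∀ k : Int, 0 ≤ k → k ≤ i0 →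
      PySem.List.pyGetD ((PySem.List.pyRange i0 (-1) (-1)).foldl (pvStep1 A B) (cnt, suf)).1 k 0
        = pvR A B k) := by
  intro fuel
  induction fuel with
  | zero =>
    intro i0 cnt suf h0 hlen hs hp hle
    have hi : i0 = -1 := by push_cast at h0; omega
    subst hi
    rw [PySem.List.pyRange_neg_one_eq_nil (by omega)]
    exact ⟨hlen, fun k _ => rfl, fun k hk0 hk1 => by omega⟩
  | succ m ih =>
    intro i0 cnt suf h0 hlen hs hp hle
    have hi0 : 0 ≤ i0 := by push_cast at h0; omega
    rw [PySem.List.pyRange_neg_one_cons (by omega : (-1 : Int) < i0), List.foldl_cons]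
    have hstep : pvStep1 A B (cnt, suf) i0 =
        (PySem.List.pySetD cnt i0
          (PySem.List.len (pvIns suf (PySem.List.pyGetD A (i0 + 1) 0)) -
            ((PySem.List.bisectRight (pvIns suf (PySem.List.pyGetD A (i0 + 1) 0))
              (PySem.List.pyGetD B i0 0) : Nat) : Int)),
         pvIns suf (PySem.List.pyGetD A (i0 + 1) 0)) := rfl
    rw [hstep]
    have hs' := pvIns_sorted suf (PySem.List.pyGetD A (i0 + 1) 0) hs
    have hcons : PySem.List.pyRange (i0 + 1) (A.length : Int) 1
        = (i0 + 1) :: PySem.List.pyRange (i0 + 2) (A.length : Int) 1 := by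
      have h := PySem.List.pyRange_one_cons (a := i0 + 1) (b := (A.length : Int)) (by omega)
      have h2 : i0 + 1 + 1 = i0 + 2 := by ring
      rw [h2] at h
      exact h
    have hp' : (pvIns suf (PySem.List.pyGetD A (i0 + 1) 0)).Perm
        ((PySem.List.pyRange (i0 + 1) (A.length : Int) 1).map
          (fun q => PySem.List.pyGetD A q 0)) := by
      refine (pvIns_perm suf _ hs).trans ?_
      rw [hcons, List.map_cons]
      exact List.Perm.cons _ hp
    have hval : PySem.List.len (pvIns suf (PySem.List.pyGetD A (i0 + 1) 0)) -
        ((PySem.List.bisectRight (pvIns suf (PySem.List.pyGetD A (i0 + 1) 0))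
          (PySem.List.pyGetD B i0 0) : Nat) : Int) = pvR A B i0 := by
      rw [PySem.List.len_eq, pvBisectRight_count _ _ hs',
          List.Perm.countP_eq _ hp', List.countP_map]
      unfold pvR
      rfl
    rw [hval]
    obtain ⟨L, U, V⟩ := ih (i0 - 1) (PySem.List.pySetD cnt i0 (pvR A B i0))
      (pvIns suf (PySem.List.pyGetD A (i0 + 1) 0))
      (by push_cast at h0 ⊢; omega)
      (by rw [PySem.List.length_pySetD]; exact hlen)
      hs'
      (by have h2 : i0 - 1 + 2 = i0 + 1 := by ring
          rw [h2]; exact hp')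
      (by omega)
    refine ⟨L, ?_, ?_⟩
    · intro k hk
      rw [U k (by omega)]
      exact pvGet_set_ne cnt k i0 _ (by omega) hi0 (by omega)
    · intro k hk0 hk1
      by_cases hki : k = i0
      · subst hki
        rw [U k (by omega)]
        rw [pvGet_set cnt k k _ hk0 (by omega) hk0 (by omega)]
        simp
      · exact V k hk0 (by omega)

-- ---- the forward sweep ----

lemma pvLoop2_spec (A B : List Int) : ∀ (fuel : Nat) (i0 : Int) (cnt pre : List Int),
    (A.length : Int) - i0 = (fuel : Int) →
    1 ≤ i0 →
    (cnt.length : Int) = (A.length : Int) →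
    pre.Pairwise (· ≤ ·) →
    pre.Perm ((PySem.List.pyRange 0 (i0 - 1) 1).map (fun p => PySem.List.pyGetD B p 0)) →
    (((PySem.List.pyRange i0 (A.length : Int) 1).foldl (pvStep2 A B) (cnt, pre)).1.length : Int)
        = (A.length : Int) ∧
    (∀ k : Int, 0 ≤ k → k < i0 →
      PySem.List.pyGetD ((PySem.List.pyRange i0 (A.length : Int) 1).foldl (pvStep2 A B) (cnt, pre)).1 k 0
        = PySem.List.pyGetD cnt k 0) ∧
    (∀ k : Int, i0 ≤ k → k < (A.length : Int) →
      PySem.List.pyGetD ((PySem.List.pyRange i0 (A.length : Int) 1).foldl (pvStep2 A B) (cnt, pre)).1 k 0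
        = PySem.List.pyGetD cnt k 0 + pvL A B k) := by
  intro fuel
  induction fuel with
  | zero =>
    intro i0 cnt pre h0 h1 hlen hs hp
    rw [PySem.List.pyRange_one_eq_nil (by push_cast at h0; omega)]
    exact ⟨hlen, fun k _ _ => rfl, fun k hk0 hk1 => by push_cast at h0; omega⟩
  | succ m ih =>
    intro i0 cnt pre h0 h1 hlen hs hp
    have hi0n : i0 < (A.length : Int) := by push_cast at h0; omega
    rw [PySem.List.pyRange_one_cons hi0n, List.foldl_cons]
    have hstep : pvStep2 A B (cnt, pre) i0 =
        (PySem.List.pySetD cnt i0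
          (PySem.List.pyGetD cnt i0 0 +
            ((PySem.List.bisectLeft (pvIns pre (PySem.List.pyGetD B (i0 - 1) 0))
              (PySem.List.pyGetD A i0 0) : Nat) : Int)),
         pvIns pre (PySem.List.pyGetD B (i0 - 1) 0)) := rfl
    rw [hstep]
    have hs' := pvIns_sorted pre (PySem.List.pyGetD B (i0 - 1) 0) hs
    have hsucc : PySem.List.pyRange 0 i0 1
        = PySem.List.pyRange 0 (i0 - 1) 1 ++ [i0 - 1] := by
      have h := PySem.List.pyRange_one_succ_right (a := (0 : Int)) (b := i0 - 1) (by omega)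
      have h2 : i0 - 1 + 1 = i0 := by ring
      rw [h2] at h
      exact h
    have hp' : (pvIns pre (PySem.List.pyGetD B (i0 - 1) 0)).Perm
        ((PySem.List.pyRange 0 i0 1).map (fun p => PySem.List.pyGetD B p 0)) := by
      refine (pvIns_perm pre _ hs).trans ?_
      rw [hsucc, List.map_append, List.map_singleton]
      exact (List.Perm.cons _ hp).trans (List.perm_append_singleton _ _).symm
    have hval : ((PySem.List.bisectLeft (pvIns pre (PySem.List.pyGetD B (i0 - 1) 0))
        (PySem.List.pyGetD A i0 0) : Nat) : Int) = pvL A B i0 := by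
      rw [pvBisectLeft_count _ _ hs', List.Perm.countP_eq _ hp', List.countP_map]
      unfold pvL
      rfl
    rw [hval]
    obtain ⟨L, U, V⟩ := ih (i0 + 1)
      (PySem.List.pySetD cnt i0 (PySem.List.pyGetD cnt i0 0 + pvL A B i0))
      (pvIns pre (PySem.List.pyGetD B (i0 - 1) 0))
      (by push_cast at h0 ⊢; omega)
      (by omega)
      (by rw [PySem.List.length_pySetD]; exact hlen)
      hs'
      (by have h2 : i0 + 1 - 1 = i0 := by ring
          rw [h2]; exact hp')
    refine ⟨L, ?_, ?_⟩
    · intro k hk0 hk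
      rw [U k hk0 (by omega)]
      exact pvGet_set_ne cnt k i0 _ hk0 (by omega) (by omega)
    · intro k hk0 hk1
      by_cases hki : k = i0
      · subst hki
        rw [U k (by omega) (by omega)]
        rw [pvGet_set cnt k k _ (by omega) (by omega) (by omega) (by omega)]
        simp
      · rw [V k (by omega) hk1]
        rw [pvGet_set_ne cnt k i0 _ (by omega) (by omega) (by omega)]

-- ---- A's result as a max of per-index counts (same as in the statement of pvCur) ----

lemma pvCur_split (A B : List Int) (i : Int) (h0 : 0 ≤ i) (hi : i < (A.length : Int)) :
    pvCur A B i = pvR A B i + pvL A B i := by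
  unfold pvCur pvR pvL
  rw [PySem.List.pyRange_one_append 0 i (A.length : Int) h0 (le_of_lt hi),
      PySem.List.pyRange_one_cons hi, List.countP_append, List.countP_cons]
  have hmid : (decide ((i < i ∧ PySem.List.pyGetD B i 0 < PySem.List.pyGetD A i 0) ∨
      (i > i ∧ PySem.List.pyGetD A i 0 > PySem.List.pyGetD B i 0)) : Bool) = false := by
    simp
  rw [hmid]
  have hL : List.countP
      (fun j => decide ((i < j ∧ PySem.List.pyGetD B i 0 < PySem.List.pyGetD A j 0) ∨
        (i > j ∧ PySem.List.pyGetD A i 0 > PySem.List.pyGetD B j 0)))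
      (PySem.List.pyRange 0 i 1) =
      List.countP (fun p => decide (PySem.List.pyGetD B p 0 < PySem.List.pyGetD A i 0))
      (PySem.List.pyRange 0 i 1) := by
    apply List.countP_congr
    intro j hj
    rw [PySem.List.mem_pyRange_one] at hj
    simp only [decide_eq_true_eq, gt_iff_lt]
    constructor
    · rintro (⟨h, _⟩ | ⟨_, h⟩) <;> [omega; exact h]
    · intro h; exact Or.inr ⟨by omega, h⟩
  have hR : List.countP
      (fun j => decide ((i < j ∧ PySem.List.pyGetD B i 0 < PySem.List.pyGetD A j 0) ∨
        (i > j ∧ PySem.List.pyGetD A i 0 > PySem.List.pyGetD B j 0)))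
      (PySem.List.pyRange (i + 1) (A.length : Int) 1) =
      List.countP (fun q => decide (PySem.List.pyGetD B i 0 < PySem.List.pyGetD A q 0))
      (PySem.List.pyRange (i + 1) (A.length : Int) 1) := by
    apply List.countP_congr
    intro j hj
    rw [PySem.List.mem_pyRange_one] at hj
    simp only [decide_eq_true_eq, gt_iff_lt]
    constructor
    · rintro (⟨_, h⟩ | ⟨h, _⟩) <;> [exact h; omega]
    · intro h; exact Or.inl ⟨by omega, h⟩
  rw [hL, hR]
  push_cast
  ring

lemma pvA_inner (A B : List Int) (i : Int) :
    (PySem.List.pyRange 0 (A.length : Int) 1).foldl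
      (fun current j =>
        if i < j ∧ PySem.List.pyGetD B i 0 < PySem.List.pyGetD A j 0 then current + 1
        else if i > j ∧ PySem.List.pyGetD A i 0 > PySem.List.pyGetD B j 0 then current + 1
        else current) 0 = pvCur A B i := by
  have hcongr := PySem.List.foldl_congr_mem (PySem.List.pyRange 0 (A.length : Int) 1)
    (fun (current : Int) j =>
      if i < j ∧ PySem.List.pyGetD B i 0 < PySem.List.pyGetD A j 0 then current + 1
      else if i > j ∧ PySem.List.pyGetD A i 0 > PySem.List.pyGetD B j 0 then current + 1
      else current)
    (fun current j =>
      if (i < j ∧ PySem.List.pyGetD B i 0 < PySem.List.pyGetD A j 0) ∨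
         (i > j ∧ PySem.List.pyGetD A i 0 > PySem.List.pyGetD B j 0) then current + 1
      else current) (0 : Int)
    (by intro acc x _; dsimp only; split_ifs <;> tauto)
  rw [hcongr, PySem.List.foldl_ite_add_one]
  unfold pvCur
  ring

lemma pvA_eq (A B : List Int) :
    solution A B = (if (A.length : Int) = 1 then 1 else
      ((PySem.List.pyRange 0 (A.length : Int) 1).map (pvCur A B)).foldl max 0) := by
  unfold solution
  simp only [PySem.List.len_eq]
  by_cases hn : (A.length : Int) = 1
  · simp [hn]
  · simp only [hn, if_false]
    have hcongr := PySem.List.foldl_congr_mem (PySem.List.pyRange 0 (A.length : Int) 1)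
      (fun maximal i =>
        if maximal <
            (PySem.List.pyRange 0 (A.length : Int) 1).foldl
              (fun current j =>
                if i < j ∧ PySem.List.pyGetD B i 0 < PySem.List.pyGetD A j 0 then current + 1
                else if i > j ∧ PySem.List.pyGetD A i 0 > PySem.List.pyGetD B j 0 then current + 1
                else current) 0
          then (PySem.List.pyRange 0 (A.length : Int) 1).foldl
              (fun current j =>
                if i < j ∧ PySem.List.pyGetD B i 0 < PySem.List.pyGetD A j 0 then current + 1
                else if i > j ∧ PySem.List.pyGetD A i 0 > PySem.List.pyGetD B j 0 then current + 1
                else current) 0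
          else maximal)
      (fun maximal i => max maximal (pvCur A B i)) 0
      (by
        intro acc x _
        dsimp only
        rw [pvA_inner A B x, max_def]
        split_ifs <;> omega)
    rw [hcongr, List.foldl_map]

-- ---- B's count array is exactly the list of pvCur values ----

lemma pvCnt_eq (A B : List Int) (h2 : 2 ≤ (A.length : Int)) :
    ((PySem.List.pyRange 1 (A.length : Int) 1).foldl (pvStep2 A B)
      (((PySem.List.pyRange ((A.length : Int) - 2) (-1) (-1)).foldl (pvStep1 A B)
          (PySem.List.pyRepeat [0] (A.length : Int), [])).1, [])).1 =
      (PySem.List.pyRange 0 (A.length : Int) 1).map (pvCur A B) := by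
  obtain ⟨L1, U1, V1⟩ := pvLoop1_spec A B ((A.length : Int) - 1).toNat ((A.length : Int) - 2)
    (PySem.List.pyRepeat [0] (A.length : Int)) []
    (by omega)
    (by rw [PySem.List.pyRepeat_singleton]; simp)
    (by simp)
    (by have h : (A.length : Int) - 2 + 2 = (A.length : Int) := by ring
        rw [h, PySem.List.pyRange_one_eq_nil le_rfl]; simp)
    (by omega)
  have hcnt1 : ∀ k : Int, 0 ≤ k → k < (A.length : Int) →
      PySem.List.pyGetD (((PySem.List.pyRange ((A.length : Int) - 2) (-1) (-1)).foldl
        (pvStep1 A B) (PySem.List.pyRepeat [0] (A.length : Int), [])).1) k 0 = pvR A B k := by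
    intro k hk0 hk1
    by_cases hk : k ≤ (A.length : Int) - 2
    · exact V1 k hk0 hk
    · have hk' : k = (A.length : Int) - 1 := by omega
      rw [U1 k (by omega)]
      have hzero : PySem.List.pyGetD (PySem.List.pyRepeat [(0 : Int)] (A.length : Int)) k 0 = 0 := by
        rw [PySem.List.pyRepeat_singleton, PySem.List.pyGetD_of_nonneg _ _ hk0,
            List.getD_eq_getElem?_getD, List.getElem?_replicate]
        have hlt : k.toNat < ((A.length : Int)).toNat := by omega
        rw [if_pos hlt]
        rfl
      have hRzero : pvR A B k = 0 := by
        unfold pvR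
        rw [hk']
        have h : (A.length : Int) - 1 + 1 = (A.length : Int) := by ring
        rw [h, PySem.List.pyRange_one_eq_nil le_rfl]
        simp
      rw [hRzero]
      exact hzero
  obtain ⟨L2, U2, V2⟩ := pvLoop2_spec A B ((A.length : Int) - 1).toNat 1
    (((PySem.List.pyRange ((A.length : Int) - 2) (-1) (-1)).foldl (pvStep1 A B)
        (PySem.List.pyRepeat [0] (A.length : Int), [])).1) []
    (by omega) (by omega) L1 (by simp)
    (by have h : (1 : Int) - 1 = 0 := by ring
        rw [h, PySem.List.pyRange_one_eq_nil le_rfl]; simp)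
  apply List.ext_getElem
  · have hL : ((PySem.List.pyRange 1 (A.length : Int) 1).foldl (pvStep2 A B)
        (((PySem.List.pyRange ((A.length : Int) - 2) (-1) (-1)).foldl (pvStep1 A B)
          (PySem.List.pyRepeat [0] (A.length : Int), [])).1, [])).1.length = A.length := by
      exact_mod_cast L2
    rw [hL, List.length_map, PySem.List.length_pyRange_one]
    omega
  · intro k hk1 hk2
    have hkA : k < A.length := by
      have hL : ((PySem.List.pyRange 1 (A.length : Int) 1).foldl (pvStep2 A B)
          (((PySem.List.pyRange ((A.length : Int) - 2) (-1) (-1)).foldl (pvStep1 A B)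
            (PySem.List.pyRepeat [0] (A.length : Int), [])).1, [])).1.length = A.length := by
        exact_mod_cast L2
      omega
    have hrhs : ((PySem.List.pyRange 0 (A.length : Int) 1).map (pvCur A B))[k] =
        pvCur A B ((0 : Int) + (k : Int)) := by
      rw [List.getElem_map, PySem.List.getElem_pyRange_one]
    have hz : (0 : Int) + (k : Int) = (k : Int) := by ring
    rw [hrhs, hz]
    have hlhs : ((PySem.List.pyRange 1 (A.length : Int) 1).foldl (pvStep2 A B)
        (((PySem.List.pyRange ((A.length : Int) - 2) (-1) (-1)).foldl (pvStep1 A B)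
          (PySem.List.pyRepeat [0] (A.length : Int), [])).1, [])).1[k] =
        PySem.List.pyGetD ((PySem.List.pyRange 1 (A.length : Int) 1).foldl (pvStep2 A B)
          (((PySem.List.pyRange ((A.length : Int) - 2) (-1) (-1)).foldl (pvStep1 A B)
            (PySem.List.pyRepeat [0] (A.length : Int), [])).1, [])).1 (k : Int) 0 := by
      rw [PySem.List.pyGetD_eq_getElem _ _ (by omega) (by exact_mod_cast hk1)]
      simp
    rw [hlhs]
    have hkInt : (k : Int) < (A.length : Int) := by exact_mod_cast hkA
    by_cases hk0 : 1 ≤ (k : Int)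
    · rw [V2 (k : Int) hk0 hkInt, hcnt1 (k : Int) (by omega) hkInt,
          pvCur_split A B (k : Int) (by omega) hkInt]
    · rw [U2 (k : Int) (by omega) (by omega), hcnt1 (k : Int) (by omega) hkInt,
          pvCur_split A B (k : Int) (by omega) hkInt]
      have hL0 : pvL A B (k : Int) = 0 := by
        unfold pvL
        have hk00 : (k : Int) = 0 := by omega
        rw [hk00, PySem.List.pyRange_one_eq_nil le_rfl]
        simp
      omega

lemma pvMaxD_eq_foldl (l : List Int) (h : ∀ x ∈ l, 0 ≤ x) :
    PySem.List.maxD l (fun x => x) 0 = l.foldl max 0 := by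
  cases l with
  | nil => rfl
  | cons x t =>
    rw [PySem.List.maxD, PySem.List.max?_id_cons]
    have hx : max 0 x = x := by
      have := h x (by simp)
      omega
    simp [List.foldl_cons, hx]

lemma pvCur_nonneg (A B : List Int) (i : Int) : 0 ≤ pvCur A B i := by
  unfold pvCur
  positivity

-- ===== VERDICT (by name: the statement is the Claim_ definition above) =====
theorem solution_spec : Claim_equal_solution := by
  intro A B _ _
  unfold Spec_solution
  rw [pvA_eq]
  unfold solution_alt
  simp only [PySem.List.len_eq]
  by_cases h2 : 2 ≤ (A.length : Int)
  · have hn1 : ¬ (A.length : Int) = 1 := by omega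
    have hle : ¬ (A.length : Int) ≤ 1 := by omega
    simp only [hn1, hle, if_false]
    rw [pvCnt_eq A B h2, pvMaxD_eq_foldl]
    intro x hx
    rw [List.mem_map] at hx
    obtain ⟨i, _, rfl⟩ := hx
    exact pvCur_nonneg A B i
  · have h01 : A.length = 0 ∨ A.length = 1 := by omega
    rcases h01 with h | h
    · have hn1 : ¬ ((A.length : Int)) = 1 := by simp [h]
      have hle : ((A.length : Int)) ≤ 1 := by simp [h]
      simp only [hn1, if_false, hle, if_pos]
      rw [h]
      norm_num [PySem.List.pyRange_one_eq_nil]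
    · simp [h]
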